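-- pv_equiv track=rewrite | github.com/alperduzgun/warden-core | src/warden/validation/frames/security/_internal/sca_check.py | _extract_reference_url
-- ===== SOURCE A (Python) =====
-- from typing import Any
--
-- def _extract_reference_url(vuln: dict[str, Any]) -> str | None:
--     """
--     Extract the most relevant reference URL from an OSV vulnerability.
--
--     Args:
--         vuln: OSV vulnerability dict.
--
--     Returns:
--         URL string, or None.
--     """
--     references = vuln.get("references", [])
--     # Prefer ADVISORY type, then WEB
--     for ref in references:
--         if ref.get("type") == "ADVISORY":
--             return ref.get("url")
--     for ref in references:
--         if ref.get("type") == "WEB":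
--             return ref.get("url")
--     if references:
--         return references[0].get("url")
--     return None
-- ===== SOURCE B (Python) =====
-- _RANK = {"ADVISORY": 0, "WEB": 1}
--
-- def _extract_reference_url(vuln):
--     """Rank-minimisation version: each reference gets a priority rank
--     (ADVISORY=0, WEB=1, other=2); keep the url of the best-ranked reference
--     seen so far (first wins on ties), stopping early on rank 0."""
--     references = vuln.get("references", [])
--     best_rank, best_url = 3, None
--     for ref in references:
--         r = _RANK.get(ref.get("type"), 2)
--         if r < best_rank:
--             best_rank, best_url = r, ref.get("url")
--             if r == 0:
--                 break
--     return best_url if best_rank < 3 else None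
-- ===== Notes on version B (the rewrite author's own statement) =====
-- stated objective: alternative
-- what changed: Replaces A's staged scans (ADVISORY scan, then WEB scan, then first element) by a single rank-minimisation pass: each reference is mapped to a priority rank via a table and the url of the lowest-ranked reference seen first is kept, with an early break on the top rank.
import Mathlib
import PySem

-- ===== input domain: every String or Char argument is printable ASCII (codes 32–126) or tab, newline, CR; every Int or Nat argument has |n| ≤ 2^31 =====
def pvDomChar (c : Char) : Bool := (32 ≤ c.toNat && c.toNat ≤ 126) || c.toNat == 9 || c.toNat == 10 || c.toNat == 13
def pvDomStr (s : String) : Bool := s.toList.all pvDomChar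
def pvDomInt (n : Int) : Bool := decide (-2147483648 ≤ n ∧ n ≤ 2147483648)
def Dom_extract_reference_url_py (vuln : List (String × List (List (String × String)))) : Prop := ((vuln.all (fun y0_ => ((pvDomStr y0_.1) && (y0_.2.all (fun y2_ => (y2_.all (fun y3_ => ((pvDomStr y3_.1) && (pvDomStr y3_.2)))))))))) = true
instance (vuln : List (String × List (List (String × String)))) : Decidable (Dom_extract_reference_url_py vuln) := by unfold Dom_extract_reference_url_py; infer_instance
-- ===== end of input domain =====

-- B replaces A's staged scans by one rank-minimisation pass (alternative decomposition); return value only.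

-- ===== PORT A =====
-- 'for ref in references: if ref.get("type") == t: return ref.get("url")' — one scan, early return
def aScan (t : String) : List (List (String × String)) → Option (Option String)
  | [] => none
  | ref :: rest =>
    if (PySem.Dict.mk ref).get? "type" == some t then
      some ((PySem.Dict.mk ref).get? "url")
    else aScan t rest

def extract_reference_url_py (vuln : List (String × List (List (String × String)))) : Option String :=
  let references := (PySem.Dict.mk vuln).getD "references" []
  match aScan "ADVISORY" references with
  | some u => u
  | none =>
    match aScan "WEB" references with
    | some u => u
    | none =>
      match references with
      | [] => none
      | r :: _ => (PySem.Dict.mk r).get? "url"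

-- ===== PORT B =====
-- module-level rank table _RANK
def bRankTable : PySem.Dict String Nat := PySem.Dict.mk [("ADVISORY", 0), ("WEB", 1)]

-- _RANK.get(ref.get("type"), 2); a None key is never in the table, so it yields the default
def bRank (ref : List (String × String)) : Nat :=
  match (PySem.Dict.mk ref).get? "type" with
  | some t => bRankTable.getD t 2
  | none => 2

-- the loop: carries (best_rank, best_url); 'break' on rank 0 = return at once
def bLoop : List (List (String × String)) → Nat → Option String → Nat × Option String
  | [], br, bu => (br, bu)
  | ref :: rest, br, bu =>
    let r := bRank ref
    if r < br then
      if r = 0 then (r, (PySem.Dict.mk ref).get? "url")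
      else bLoop rest r ((PySem.Dict.mk ref).get? "url")
    else bLoop rest br bu

def extract_reference_url_py_alt (vuln : List (String × List (List (String × String)))) : Option String :=
  let references := (PySem.Dict.mk vuln).getD "references" []
  let res := bLoop references 3 none
  if res.1 < 3 then res.2 else none

-- ===== PRECONDITION & SPEC =====
def Spec_extract_reference_url_py (vuln : List (String × List (List (String × String)))) (out : Option String) : Prop := out = extract_reference_url_py_alt vuln
instance (vuln : List (String × List (List (String × String)))) (out : Option String) : Decidable (Spec_extract_reference_url_py vuln out) := by unfold Spec_extract_reference_url_py; infer_instance

-- ===== CLAIM (what is proved, stated in full; the proofs are below) =====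
def Claim_equal_extract_reference_url_py : Prop := ∀ (vuln : List (String × List (List (String × String)))), Dom_extract_reference_url_py vuln → Spec_extract_reference_url_py vuln (extract_reference_url_py vuln)

-- ===== LEMMAS AND PROOFS =====

-- rank 0 ⟺ type is ADVISORY, rank 1 ⟺ type is WEB, rank 2 otherwise
lemma bRank_cases (ref : List (String × String)) :
    (bRank ref = 0 ∧ (PySem.Dict.mk ref).get? "type" = some "ADVISORY") ∨
    (bRank ref = 1 ∧ (PySem.Dict.mk ref).get? "type" = some "WEB") ∨
    (bRank ref = 2 ∧ (PySem.Dict.mk ref).get? "type" ≠ some "ADVISORY" ∧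
       (PySem.Dict.mk ref).get? "type" ≠ some "WEB") := by
  unfold bRank
  cases h : (PySem.Dict.mk ref).get? "type" with
  | none => right; right; simp
  | some t =>
    by_cases hA : t = "ADVISORY"
    · left; subst hA
      exact ⟨by decide, rfl⟩
    · by_cases hW : t = "WEB"
      · right; left; subst hW
        exact ⟨by decide, rfl⟩
      · right; right
        have hAb : (("ADVISORY" : String) == t) = false := by
          simp; exact fun he => hA he.symm
        have hWb : (("WEB" : String) == t) = false := by
          simp; exact fun he => hW he.symm
        refine ⟨?_, by simp [hA], by simp [hW]⟩
        simp [bRankTable, PySem.Dict.getD, PySem.Dict.get?, List.find?, hAb, hWb]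

-- once best_rank = 1, only an ADVISORY can improve, and it breaks
lemma bLoop_one (refs : List (List (String × String))) : ∀ (bu : Option String),
    bLoop refs 1 bu =
      match aScan "ADVISORY" refs with
      | some u => (0, u)
      | none => (1, bu) := by
  induction refs with
  | nil => intro bu; simp [bLoop, aScan]
  | cons ref rest ih =>
    intro bu
    rcases bRank_cases ref with ⟨hr, ht⟩ | ⟨hr, ht⟩ | ⟨hr, htA, htW⟩
    · simp [bLoop, aScan, hr, ht]
    · simp [bLoop, aScan, hr, ht, ih]
    · simp [bLoop, aScan, hr, htA, ih]

-- once best_rank = 2, an ADVISORY breaks and a WEB drops the rank to 1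
lemma bLoop_two (refs : List (List (String × String))) : ∀ (bu : Option String),
    bLoop refs 2 bu =
      match aScan "ADVISORY" refs with
      | some u => (0, u)
      | none =>
        match aScan "WEB" refs with
        | some w => (1, w)
        | none => (2, bu) := by
  induction refs with
  | nil => intro bu; simp [bLoop, aScan]
  | cons ref rest ih =>
    intro bu
    rcases bRank_cases ref with ⟨hr, ht⟩ | ⟨hr, ht⟩ | ⟨hr, htA, htW⟩
    · simp [bLoop, aScan, hr, ht]
    · simp [bLoop, aScan, hr, ht, bLoop_one]
    · simp [bLoop, aScan, hr, htA, htW, ih]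

-- from the initial state: the loop realises A's three-stage preference
lemma bLoop_three (refs : List (List (String × String))) :
    bLoop refs 3 none =
      match aScan "ADVISORY" refs with
      | some u => (0, u)
      | none =>
        match aScan "WEB" refs with
        | some w => (1, w)
        | none =>
          match refs with
          | [] => (3, none)
          | r :: _ => (2, (PySem.Dict.mk r).get? "url") := by
  cases refs with
  | nil => simp [bLoop, aScan]
  | cons ref rest =>
    rcases bRank_cases ref with ⟨hr, ht⟩ | ⟨hr, ht⟩ | ⟨hr, htA, htW⟩
    · simp [bLoop, aScan, hr, ht]
    · simp [bLoop, aScan, hr, ht, bLoop_one]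
    · simp [bLoop, aScan, hr, htA, htW, bLoop_two]

theorem extract_reference_url_py_eq (vuln : List (String × List (List (String × String)))) :
    extract_reference_url_py vuln = extract_reference_url_py_alt vuln := by
  simp only [extract_reference_url_py, extract_reference_url_py_alt, bLoop_three]
  cases hA : aScan "ADVISORY" ((PySem.Dict.mk vuln).getD "references" []) with
  | some u => simp
  | none =>
    cases hW : aScan "WEB" ((PySem.Dict.mk vuln).getD "references" []) with
    | some w => simp
    | none =>
      cases hr : (PySem.Dict.mk vuln).getD "references" [] with
      | nil => simp
      | cons r rest => simp

-- ===== VERDICT (by name: the statement is the Claim_ definition above) =====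
theorem extract_reference_url_py_spec : Claim_equal_extract_reference_url_py := by
  intro vuln _
  exact extract_reference_url_py_eq vuln
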